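-- pv_equiv track=rewrite | github.com/Fr4nc3/code-hints | python/Scientific/sample3/6_4/lists.py | replace_with_large
-- ===== SOURCE A (Python) =====
-- def replace_with_large(list):
--     '''6.4.d'''
--     # replace elements to with the greatest between its neighbors
--     # only first and last keep heir location
--     i = 0
--     while i < len(list):
--         if i == 0 or i == len(list) - 1:
--             i += 1
--             continue
--         else:
--             list[i] = max(list[i], list[i - 1], list[i + 1])
--         i += 1
--
--     return list
-- ===== SOURCE B (Python) =====
-- def replace_with_large(list):
--     '''6.4.d'''
--     # Running prefix-max accumulator: the in-place left-to-right update makes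
--     # each interior element the max of the original values up to index i+1.
--     if len(list) > 2:
--         running = max(list[0], list[1])
--         for i in range(1, len(list) - 1):
--             running = max(running, list[i + 1])
--             list[i] = running
--     return list
-- ===== Notes on version B (the rewrite author's own statement) =====
-- stated objective: simpler
-- what changed: B replaces the three-neighbor read (including the already-overwritten left neighbor) with a single running prefix-max accumulator threaded through one forward pass; it never reads list[i-1].
import Mathlib
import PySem

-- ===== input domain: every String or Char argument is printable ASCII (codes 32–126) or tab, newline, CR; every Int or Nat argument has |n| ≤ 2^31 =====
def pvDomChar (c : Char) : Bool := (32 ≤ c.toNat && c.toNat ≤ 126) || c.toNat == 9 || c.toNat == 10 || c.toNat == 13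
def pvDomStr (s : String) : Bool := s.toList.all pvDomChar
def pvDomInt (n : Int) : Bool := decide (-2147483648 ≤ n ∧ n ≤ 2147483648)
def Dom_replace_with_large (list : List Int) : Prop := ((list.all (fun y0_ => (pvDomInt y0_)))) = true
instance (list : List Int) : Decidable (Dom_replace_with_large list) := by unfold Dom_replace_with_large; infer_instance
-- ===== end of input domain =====

-- B changes the decomposition (a running prefix-max accumulator instead of reading three
-- neighbors, one already overwritten); same O(n) cost, return value proved equal.
-- Both Pythons mutate the argument list in place; the equivalence here is about the return value.

-- ===== PORT A =====
-- A's while-loop: index i walks 0..len; first/last skipped; interior set to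
-- max(list[i], list[i-1], list[i+1]) on the current (partially updated) list.
-- The fuel parameter only makes the recursion structural; it is always sufficient.
def replALoop (fuel : Nat) (l : List Int) (i : Nat) : List Int :=
  match fuel with
  | 0 => l
  | fuel + 1 =>
    if i < l.length then
      if i = 0 ∨ i = l.length - 1 then
        replALoop fuel l (i + 1)
      else
        replALoop fuel (l.set i (max (max (l.getD i 0) (l.getD (i - 1) 0)) (l.getD (i + 1) 0))) (i + 1)
    else l

def replace_with_large (list : List Int) : List Int := replALoop (list.length + 1) list 0

-- ===== PORT B =====
-- B's for-loop over range(1, len-1) threading the accumulator `running`.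
def replBLoop (fuel : Nat) (l : List Int) (running : Int) (i : Nat) : List Int :=
  match fuel with
  | 0 => l
  | fuel + 1 =>
    if i < l.length - 1 then
      let running' := max running (l.getD (i + 1) 0)
      replBLoop fuel (l.set i running') running' (i + 1)
    else l

def replace_with_large_alt (list : List Int) : List Int :=
  if list.length > 2 then
    replBLoop list.length list (max (list.getD 0 0) (list.getD 1 0)) 1
  else list

-- ===== PRECONDITION & SPEC =====
def Spec_replace_with_large (list : List Int) (out : List Int) : Prop := out = replace_with_large_alt list
instance (list : List Int) (out : List Int) : Decidable (Spec_replace_with_large list out) := by unfold Spec_replace_with_large; infer_instance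

-- ===== CLAIM (what is proved, stated in full; the proofs are below) =====
def Claim_equal_replace_with_large : Prop := ∀ (list : List Int), Dom_replace_with_large list → Spec_replace_with_large list (replace_with_large list)

-- ===== LEMMAS AND PROOFS =====

lemma replA_stop (f i : Nat) (l : List Int) (h : ¬ i < l.length) : replALoop f l i = l := by
  cases f <;> simp [replALoop, h]

-- Invariant: at step i ≥ 1 the accumulator equals max of the current l[i-1] and l[i];
-- then both loops write the same value and preserve the invariant.
lemma loops_eq : ∀ (f : Nat) (l : List Int) (i : Nat) (running : Int),
    l.length - i ≤ f → 1 ≤ i →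
    running = max (l.getD (i - 1) 0) (l.getD i 0) →
    replALoop f l i = replBLoop f l running i := by
  intro f
  induction f with
  | zero => intro l i running _ _ _; simp [replALoop, replBLoop]
  | succ f ih =>
    intro l i running hn h1 hrun
    by_cases hlt : i < l.length - 1
    · have hi : i < l.length := by omega
      have hne : ¬ (i = 0 ∨ i = l.length - 1) := by omega
      simp only [replALoop, replBLoop, if_pos hi, if_neg hne, if_pos hlt]
      have hv : max (max (l.getD i 0) (l.getD (i - 1) 0)) (l.getD (i + 1) 0)
          = max running (l.getD (i + 1) 0) := by
        rw [hrun]; omega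
      rw [hv]
      apply ih
      · simp only [List.length_set]; omega
      · omega
      · have h1' : (l.set i (max running (l.getD (i + 1) 0))).getD ((i + 1) - 1) 0
            = max running (l.getD (i + 1) 0) := by
          simp only [Nat.add_sub_cancel]
          rw [List.getD_eq_getElem?_getD, List.getElem?_set_self (by omega)]
          simp
        have h2' : (l.set i (max running (l.getD (i + 1) 0))).getD (i + 1) 0
            = l.getD (i + 1) 0 := by
          rw [List.getD_eq_getElem?_getD, List.getElem?_set_ne (by omega),
            ← List.getD_eq_getElem?_getD]
        rw [h1', h2']
        have : l.getD (i + 1) 0 ≤ max running (l.getD (i + 1) 0) := le_max_right _ _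
        omega
    · -- tail: B stops; A either stops or skips the last index once and stops
      simp only [replBLoop, if_neg hlt]
      by_cases hi : i < l.length
      · have hlast : i = l.length - 1 := by omega
        simp only [replALoop, if_pos hi, if_pos (Or.inr hlast)]
        exact replA_stop f (i + 1) l (by omega)
      · exact replA_stop (f + 1) i l hi

lemma small_fixed (l : List Int) (h : ¬ l.length > 2) : replace_with_large l = l := by
  rcases l with _ | ⟨a, _ | ⟨b, _ | ⟨c, t⟩⟩⟩
  · rfl
  · rfl
  · rfl
  · exfalso; simp only [List.length_cons] at h; omega

-- ===== VERDICT (by name: the statement is the Claim_ definition above) =====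
theorem replace_with_large_spec : Claim_equal_replace_with_large := by
  intro l _
  unfold Spec_replace_with_large replace_with_large_alt
  by_cases hlen : l.length > 2
  · rw [if_pos hlen]
    unfold replace_with_large
    have h0 : 0 < l.length := by omega
    simp only [replALoop, if_pos h0]
    exact loops_eq l.length l 1 _ (by omega) (by omega) rfl
  · rw [if_neg hlen]
    exact small_fixed l hlen
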